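-- pv_equiv track=rewrite | github.com/oculi-s/Programmers | 자동완성.py | solution
-- ===== SOURCE A (Python) =====
-- def solution(words):
--     words.sort()
--     w = sorted(words) + ['1']
--     v = 0
--     hh = 0
--     for i in range(len(w)-1):
--         h = 1
--         while w[i][:h] == w[i+1][:h]:
--             h += 1
--         v += min(max(h,hh),len(w[i]))
--         hh = h
--     return v
-- ===== SOURCE B (Python) =====
-- def solution(words):
--     # Brute force over unordered pairs: for each word, the keystrokes needed are
--     # min(1 + longest common prefix with any other word, len(word)).  No sorting,
--     # no slicing, no sentinel; each pair is compared char-by-char once.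
--     total = 0
--     for i, w in enumerate(words):
--         best = 0
--         for j, u in enumerate(words):
--             if j != i:
--                 k = 0
--                 for x, y in zip(w, u):
--                     if x != y:
--                         break
--                     k += 1
--                 if k > best:
--                     best = k
--         total += min(best + 1, len(w))
--     return total
-- ===== Notes on version B (the rewrite author's own statement) =====
-- stated objective: alternative
-- what changed: B drops A's sorting, adjacent-pair scan and appended '1' sentinel entirely: it computes each word's keystroke count directly as min(1 + longest common prefix with any other word, len(word)) by comparing every pair of words char-by-char, with no slicing.
-- intended difference: When the lexicographically largest word starts with '1' (and is not '1' itself) while no other word starts with '1', A's appended sentinel '1' inflates that word's count by 1; B returns the intended count min(1 + longest common prefix with any other word, len(word)). — e.g. on solution(["1a"]): A returns 2, B returns 1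
import Mathlib
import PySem

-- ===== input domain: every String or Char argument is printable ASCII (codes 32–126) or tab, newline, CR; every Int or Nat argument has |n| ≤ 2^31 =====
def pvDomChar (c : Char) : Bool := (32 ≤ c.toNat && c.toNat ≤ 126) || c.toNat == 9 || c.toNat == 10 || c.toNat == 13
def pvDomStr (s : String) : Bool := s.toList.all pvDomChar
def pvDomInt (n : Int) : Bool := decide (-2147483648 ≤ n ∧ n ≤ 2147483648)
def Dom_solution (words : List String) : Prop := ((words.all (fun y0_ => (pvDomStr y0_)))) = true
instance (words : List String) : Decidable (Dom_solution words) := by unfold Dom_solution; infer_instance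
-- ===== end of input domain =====

-- B drops A's sort, adjacent-pair scan and '1' sentinel: it computes each word's count
-- directly as min(1 + longest common prefix with any other word, len) by pairwise
-- char-by-char comparison (a different algorithm of similar cost, not claimed faster).
-- Where A's appended sentinel '1' inflates the count of a largest word starting with '1',
-- B returns the intended count (see D_solution below).  Python A sorts its argument in
-- place; B does not mutate it — the equivalence proved here is about the return value.


-- ===== PORT A =====
-- `while w[i][:h] == w[i+1][:h]: h += 1` — the fuel only makes the recursion total;
-- Python's loop ends exactly when the slices differ, which the fuel bound never cuts off
-- (slices longer than both strings are the full strings, and under Pre_ neighbours differ).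
def aWhileF : Nat → List Char → List Char → Nat → Nat
  | 0, _, _, h => h
  | fuel + 1, a, b, h => if a.take h = b.take h then aWhileF fuel a b (h + 1) else h

def aWhile (a b : List Char) (h : Nat) : Nat :=
  aWhileF (a.length + b.length + 2 - h) a b h

-- the body of A's `for i in range(len(w)-1)` loop, state (v, hh)
def bodyA (w : List String) (s : Int × Int) (i : Int) : Int × Int :=
  let wi := PySem.List.pyGetD w i ""
  let wj := PySem.List.pyGetD w (i + 1) ""
  let h : Int := ((aWhile wi.toList wj.toList 1 : Nat) : Int)
  (s.1 + min (max h s.2) (PySem.Str.len wi), h)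

def solution (words : List String) : Int :=
  let ws := PySem.List.sorted words (fun s => s) false        -- words.sort()
  let w := PySem.List.sorted ws (fun s => s) false ++ ["1"]   -- sorted(words) + ['1']
  ((PySem.List.pyRange 0 ((w.length : Int) - 1) 1).foldl (bodyA w) (0, 0)).1

-- ===== PORT B =====
-- the `for x, y in zip(w, u): if x != y: break; k += 1` common-prefix walk
def lcpB : List Char → List Char → Nat
  | x :: a, y :: b => if x = y then lcpB a b + 1 else 0
  | _, _ => 0

def solution_alt (words : List String) : Int :=
  (PySem.List.enumerate words).foldl (fun total p =>
    total +
      min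
        (((PySem.List.enumerate words).foldl (fun best q =>
            if q.1 ≠ p.1 then
              if lcpB p.2.toList q.2.toList > best then lcpB p.2.toList q.2.toList else best
            else best) 0 : Nat) + 1 : Int)
        (PySem.Str.len p.2)) 0

-- ===== PRECONDITION & SPEC =====
-- Pre_ excludes exactly the inputs on which Python A never returns: it loops forever on a
-- duplicated word (two equal neighbours after sorting) and when the largest word is '1'
-- itself (that word equals the appended sentinel).
def Pre_solution (words : List String) : Prop :=
  words.Nodup ∧ ¬("1" ∈ words ∧ ∀ b ∈ words, b.toList ≤ ['1'])

instance (words : List String) : Decidable (Pre_solution words) := by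
  unfold Pre_solution; infer_instance

def pvWitness_solution : List String := ["ab", "a", "b"]

-- When the (lexicographically) largest word starts with '1' (and is not '1' itself) while
-- no other word starts with '1', A's appended sentinel '1' inflates that word's count by 1;
-- B returns the intended count min(1 + longest common prefix with any other word, len(word)).
def D_solution (words : List String) : Prop :=
  ∃ a ∈ words, (∀ b ∈ words, b.toList ≤ a.toList) ∧ a.toList.head? = some '1' ∧
    a ≠ "1" ∧ ∀ b ∈ words, b ≠ a → b.toList.head? ≠ some '1'

instance (words : List String) : Decidable (D_solution words) := by
  unfold D_solution; infer_instance

def Spec_solution (words : List String) (out : Int) : Prop :=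
  ¬ D_solution words → out = solution_alt words

instance (words : List String) (out : Int) : Decidable (Spec_solution words out) := by
  unfold Spec_solution; infer_instance

def pvDiffWitness_solution : List String := ["1a"]

def pvDiffWitnessOut_solution : Int × Int := (2, 1)

-- ===== CLAIM (what is proved, stated in full; the proofs are below) =====
def Claim_unchanged_solution : Prop :=
  ∀ (words : List String), Dom_solution words → Pre_solution words →
    Spec_solution words (solution words)

def Claim_changed_solution : Prop :=
  Dom_solution (pvDiffWitness_solution) ∧ Pre_solution (pvDiffWitness_solution) ∧
  D_solution (pvDiffWitness_solution) ∧
  solution (pvDiffWitness_solution) = pvDiffWitnessOut_solution.1 ∧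
  solution_alt (pvDiffWitness_solution) = pvDiffWitnessOut_solution.2 ∧
  pvDiffWitnessOut_solution.1 ≠ pvDiffWitnessOut_solution.2

def Claim_exact_solution : Prop :=
  ∀ (words : List String), Dom_solution words → Pre_solution words → D_solution words →
    solution words ≠ solution_alt words

-- ===== LEMMAS AND PROOFS =====

theorem lcpB_nil_right (a : List Char) : lcpB a [] = 0 := by cases a <;> rfl

theorem lcpB_comm (a : List Char) : ∀ b, lcpB a b = lcpB b a := by
  induction a with
  | nil => intro b; cases b <;> rfl
  | cons x a ih =>
    intro b
    cases b with
    | nil => rfl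
    | cons y b =>
      simp only [lcpB]
      by_cases h : x = y
      · subst h; simp [ih]
      · simp [h, Ne.symm h]

theorem lcpB_le_left (a : List Char) : ∀ b, lcpB a b ≤ a.length := by
  induction a with
  | nil => intro b; cases b <;> simp [lcpB]
  | cons x a ih =>
    intro b
    cases b with
    | nil => simp [lcpB]
    | cons y b =>
      simp only [lcpB]
      by_cases h : x = y <;> simp [h]
      exact ih b

theorem lcpB_self (a : List Char) : lcpB a a = a.length := by
  induction a with
  | nil => rfl
  | cons x a ih => simp [lcpB, ih]

theorem lcpB_take_eq (a : List Char) : ∀ (b : List Char) (h : Nat), h ≤ lcpB a b →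
    a.take h = b.take h := by
  induction a with
  | nil => intro b h hle; cases b <;> simp_all [lcpB]
  | cons x a ih =>
    intro b h hle
    cases b with
    | nil => simp [lcpB_nil_right] at hle; simp [hle]
    | cons y b =>
      simp only [lcpB] at hle
      by_cases hxy : x = y
      · subst hxy
        cases h with
        | zero => simp
        | succ h =>
          simp only [List.take_succ_cons]
          simp at hle
          rw [ih b h (by omega)]
      · simp [hxy] at hle
        subst hle; simp

theorem lcpB_take_ne (a : List Char) : ∀ b, a ≠ b →
    a.take (lcpB a b + 1) ≠ b.take (lcpB a b + 1) := by
  induction a with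
  | nil =>
    intro b hne
    cases b with
    | nil => exact absurd rfl hne
    | cons y b => simp [lcpB]
  | cons x a ih =>
    intro b hne
    cases b with
    | nil => simp [lcpB_nil_right]
    | cons y b =>
      simp only [lcpB]
      by_cases hxy : x = y
      · subst hxy
        have hab : a ≠ b := by intro h; exact hne (by rw [h])
        simpa using ih b hab
      · simp [hxy]

theorem aWhileF_eq (a b : List Char) (hne : a ≠ b) :
    ∀ fuel h, h ≤ lcpB a b + 1 → lcpB a b + 1 ≤ h + fuel → aWhileF fuel a b h = lcpB a b + 1 := by
  intro fuel
  induction fuel with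
  | zero => intro h h1 h2; simp [aWhileF]; omega
  | succ fuel ih =>
    intro h h1 h2
    simp only [aWhileF]
    rcases Nat.lt_or_ge h (lcpB a b + 1) with hlt | hge
    · rw [if_pos (lcpB_take_eq a b h (by omega))]
      exact ih (h + 1) (by omega) (by omega)
    · have : h = lcpB a b + 1 := by omega
      subst this
      rw [if_neg (lcpB_take_ne a b hne)]

theorem aWhile_one (a b : List Char) (hne : a ≠ b) : aWhile a b 1 = lcpB a b + 1 := by
  have hle := lcpB_le_left a b
  exact aWhileF_eq a b hne _ 1 (by omega) (by omega)

theorem lcpB_one (a : List Char) : lcpB a ['1'] = if a.head? = some '1' then 1 else 0 := by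
  cases a with
  | nil => rfl
  | cons c r =>
    simp only [lcpB, List.head?_cons, lcpB_nil_right]
    by_cases h : c = '1' <;> simp [h]

theorem lcp_head_pos (a b : List Char) (c : Char) (ha : a.head? = some c)
    (hb : b.head? = some c) : 1 ≤ lcpB a b := by
  cases a with
  | nil => simp at ha
  | cons x a =>
    cases b with
    | nil => simp at hb
    | cons y b =>
      simp at ha hb
      subst ha; subst hb
      simp [lcpB]

theorem lcp_zero_head (a b : List Char) (c d : Char) (ha : a.head? = some c)
    (hb : b.head? = some d) (hcd : c ≠ d) : lcpB a b = 0 := by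
  cases a with
  | nil => rfl
  | cons x a =>
    cases b with
    | nil => exact lcpB_nil_right _
    | cons y b =>
      simp at ha hb
      subst ha; subst hb
      simp [lcpB, hcd]

theorem lex_lcp (a : List Char) : ∀ b c, List.Lex (· < ·) a b → List.Lex (· < ·) b c →
    lcpB a c ≤ lcpB a b ∧ lcpB a c ≤ lcpB b c := by
  induction a with
  | nil => intro b c h1 h2; simp [lcpB]
  | cons x a ih =>
    intro b c h1 h2
    cases h1 with
    | rel hxy =>
      rename_i y b'
      cases h2 with
      | rel hyz =>
        rename_i z c'
        have : x ≠ z := ne_of_lt (lt_trans hxy hyz)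
        simp [lcpB, this]
      | cons h2' =>
        simp [lcpB, ne_of_lt hxy]
    | cons h1' =>
      rename_i b'
      cases h2 with
      | rel hyz =>
        rename_i z c'
        simp [lcpB, ne_of_lt hyz]
      | cons h2' =>
        rename_i c'
        have := ih b' c' h1' h2'
        simp [lcpB]
        omega

theorem head_mono (a b : List Char) (h : List.Lex (· < ·) a b) (ca cb : Char)
    (ha : a.head? = some ca) (hb : b.head? = some cb) : ca ≤ cb := by
  cases h with
  | nil => simp at ha
  | rel hr => simp at ha hb; subst ha; subst hb; exact le_of_lt hr
  | cons _ => simp at ha hb; subst ha; subst hb; exact le_refl _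

def nlcp (x y : String) : Nat := lcpB x.toList y.toList

theorem str_lex (q m : String) (h : q < m) : List.Lex (· < ·) q.toList m.toList :=
  String.lt_iff_toList_lt.mp h

theorem str_lcp_left (q m x : String) (h1 : q ≤ m) (h2 : m ≤ x) : nlcp x q ≤ nlcp x m := by
  rcases lt_or_eq_of_le h1 with hlt1 | heq1
  · rcases lt_or_eq_of_le h2 with hlt2 | heq2
    · have := lex_lcp q.toList m.toList x.toList (str_lex q m hlt1) (str_lex m x hlt2)
      unfold nlcp
      rw [lcpB_comm x.toList q.toList, lcpB_comm x.toList m.toList]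
      exact this.2
    · subst heq2
      unfold nlcp
      rw [lcpB_self]
      exact lcpB_le_left _ _
  · subst heq1; exact le_refl _

theorem str_lcp_right (x y r : String) (h1 : x ≤ y) (h2 : y ≤ r) : nlcp x r ≤ nlcp x y := by
  rcases lt_or_eq_of_le h2 with hlt2 | heq2
  · rcases lt_or_eq_of_le h1 with hlt1 | heq1
    · exact (lex_lcp x.toList y.toList r.toList (str_lex x y hlt1) (str_lex y r hlt2)).1
    · subst heq1
      unfold nlcp
      rw [lcpB_self]
      exact lcpB_le_left _ _
  · subst heq2; exact le_refl _

theorem str_head_le (a b : String) (h : a ≤ b) (ca cb : Char)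
    (ha : a.toList.head? = some ca) (hb : b.toList.head? = some cb) : ca ≤ cb := by
  rcases lt_or_eq_of_le h with hlt | heq
  · exact head_mono _ _ (str_lex a b hlt) ca cb ha hb
  · subst heq; rw [ha] at hb; injection hb with h'; exact le_of_eq h'

theorem str_head_ex (a b : String) (h : a ≤ b) (ca : Char)
    (ha : a.toList.head? = some ca) : ∃ cb, b.toList.head? = some cb := by
  rcases lt_or_eq_of_le h with hlt | heq
  · have hL := str_lex a b hlt
    rcases hb : b.toList with _ | ⟨c, t⟩
    · rw [hb] at hL
      exact absurd hL (List.not_lex_nil)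
    · exact ⟨c, by simp⟩
  · subst heq; exact ⟨ca, ha⟩

def maxL (ns : List Nat) : Nat := ns.foldl max 0

theorem foldl_max_init (t : List Nat) : ∀ b : Nat, t.foldl max b = max b (maxL t) := by
  induction t with
  | nil => intro b; simp [maxL]
  | cons c r ih =>
    intro b
    simp only [maxL, List.foldl_cons] at *
    rw [ih (max b c), ih (max 0 c)]
    omega

theorem maxL_append (s t : List Nat) : maxL (s ++ t) = max (maxL s) (maxL t) := by
  simp only [maxL, List.foldl_append]
  rw [foldl_max_init t (List.foldl max 0 s)]
  rfl

theorem maxL_dom (ns : List Nat) (v : Nat) (hv : v ∈ ns) (hd : ∀ u ∈ ns, u ≤ v) :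
    maxL ns = v := by
  have h1 := PySem.List.le_foldl_max ns 0
  have h2 := PySem.List.foldl_max_mem ns 0
  unfold maxL
  rcases h2 with h2 | h2
  · have := h1.2 v hv
    omega
  · exact le_antisymm (hd _ h2) (h1.2 v hv)

theorem rel_last (P : List String) : ∀ m : String, P.Pairwise (· < ·) →
    P.getLast? = some m → ∀ q ∈ P, q ≤ m := by
  induction P with
  | nil => intro m _ _ q hq; simp at hq
  | cons a t ih =>
    intro m hp hl q hq
    cases t with
    | nil =>
      simp at hl hq
      subst hl; subst hq; exact le_refl _
    | cons b t' =>
      rw [List.getLast?_cons_cons] at hl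
      rcases List.mem_cons.mp hq with rfl | hq'
      · have hm : m ∈ b :: t' := List.mem_of_getLast? hl
        exact le_of_lt ((List.pairwise_cons.mp hp).1 m hm)
      · exact ih m (List.pairwise_cons.mp hp).2 hl q hq'

def gval (L : List String) (x : String) : Int :=
  min ((maxL ((L.erase x).map (nlcp x)) : Int) + 1) (PySem.Str.len x)

def lcpOpt : Option String → String → Nat
  | none, _ => 0
  | some m, x => nlcp m x

theorem nlcp_comm (x y : String) : nlcp x y = nlcp y x := lcpB_comm _ _

theorem gval_split (P R : List String) (x : String)
    (h : (P ++ x :: R).Pairwise (· < ·)) :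
    gval (P ++ x :: R) x =
      min ((max (lcpOpt P.getLast? x) (lcpOpt R.head? x) : Int) + 1) (PySem.Str.len x) := by
  rcases List.pairwise_append.mp h with ⟨hP, hxR, hcross⟩
  have hxR' := List.pairwise_cons.mp hxR
  have hxltP : ∀ p ∈ P, p < x := fun p hp => hcross p hp x (by simp)
  have hxnotP : x ∉ P := fun hx => absurd rfl (ne_of_lt (hxltP x hx))
  have herase : (P ++ x :: R).erase x = P ++ R := by
    rw [List.erase_append_right _ hxnotP, List.erase_cons_head]
  unfold gval
  have hPpart : maxL (P.map (nlcp x)) = lcpOpt P.getLast? x := by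
    rcases hPl : P.getLast? with _ | m
    · rw [List.getLast?_eq_none_iff.mp hPl]; rfl
    · have hmP : m ∈ P := List.mem_of_getLast? hPl
      simp only [lcpOpt]
      rw [nlcp_comm m x]
      apply maxL_dom
      · exact List.mem_map_of_mem hmP
      · intro u hu
        rcases List.mem_map.mp hu with ⟨q, hq, rfl⟩
        exact str_lcp_left q m x (rel_last P m hP hPl q hq) (le_of_lt (hxltP m hmP))
  have hRpart : maxL (R.map (nlcp x)) = lcpOpt R.head? x := by
    rcases R with _ | ⟨y, T⟩
    · rfl
    · simp only [List.head?_cons, lcpOpt]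
      rw [nlcp_comm y x]
      apply maxL_dom
      · exact List.mem_map_of_mem (by simp)
      · intro u hu
        rcases List.mem_map.mp hu with ⟨r, hr, rfl⟩
        have hxy : x ≤ y := le_of_lt (hxR'.1 y (by simp))
        have hyr : y ≤ r := by
          rcases List.mem_cons.mp hr with rfl | hr'
          · exact le_refl _
          · exact le_of_lt ((List.pairwise_cons.mp hxR'.2).1 r hr')
        exact str_lcp_right x y r hxy hyr
  rw [herase, List.map_append, maxL_append, hPpart, hRpart]
  simp [Nat.cast_max]

def pairGo (hh : Int) : List String → Int
  | a :: b :: rest =>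
      min (max ((aWhile a.toList b.toList 1 : Nat) : Int) hh) (PySem.Str.len a) +
        pairGo ((aWhile a.toList b.toList 1 : Nat) : Int) (b :: rest)
  | _ => 0

theorem bodyA_shift (a : String) (w' : List String) (s : Int × Int) (k : Nat) :
    bodyA (a :: w') s ((k : Int) + 1) = bodyA w' s (k : Int) := by
  unfold bodyA
  have h1 : ((k : Int) + 1) = ((k + 1 : Nat) : Int) := by push_cast; ring
  have h2 : (((k + 1 : Nat) : Int) + 1) = ((k + 2 : Nat) : Int) := by push_cast; ring
  rw [h1, h2, PySem.List.pyGetD_natCast, PySem.List.pyGetD_natCast,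
      PySem.List.pyGetD_natCast, PySem.List.pyGetD_natCast]
  simp

theorem rcore (w : List String) : ∀ (v hh : Int),
    ((List.range (w.length - 1)).foldl (fun (s : Int × Int) (k : Nat) => bodyA w s (k : Int)) (v, hh)).1 =
      v + pairGo hh w := by
  induction w with
  | nil => intro v hh; simp [pairGo]
  | cons a w ih =>
    intro v hh
    cases w with
    | nil => simp [pairGo]
    | cons b t =>
      have hlen : (a :: b :: t).length - 1 = t.length + 1 := by simp
      rw [hlen, List.range_succ_eq_map, List.foldl_cons, List.foldl_map]
      have hb0 : bodyA (a :: b :: t) (v, hh) ((0 : Nat) : Int) =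
          (v + min (max ((aWhile a.toList b.toList 1 : Nat) : Int) hh) (PySem.Str.len a),
           ((aWhile a.toList b.toList 1 : Nat) : Int)) := by
        unfold bodyA
        rw [PySem.List.pyGetD_natCast]
        have : ((0 : Nat) : Int) + 1 = ((1 : Nat) : Int) := by norm_num
        rw [this, PySem.List.pyGetD_natCast]
        rfl
      rw [hb0]
      have hcongr : ∀ (s : Int × Int) (k : Nat), k ∈ List.range t.length →
          bodyA (a :: b :: t) s ((k.succ : Nat) : Int) = bodyA (b :: t) s (k : Int) := by
        intro s k _
        have : ((k.succ : Nat) : Int) = (k : Int) + 1 := by push_cast; ring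
        rw [this, bodyA_shift]
      rw [PySem.List.foldl_congr_mem _ _ _ _ (fun s k hk => hcongr s k hk)]
      have hlen2 : t.length = (b :: t).length - 1 := by simp
      rw [hlen2, ih]
      simp [pairGo]
      ring

def sortedW (words : List String) : List String :=
  PySem.List.sorted words (fun s => s) false

theorem solution_eq_pairGo (words : List String) :
    solution words = pairGo 0 (sortedW words ++ ["1"]) := by
  unfold solution sortedW
  simp only []
  rw [PySem.List.sorted_sorted]
  set S := PySem.List.sorted words (fun s => s) false with hS
  have hlen : ((S ++ ["1"]).length : Int) - 1 = ((S.length : Nat) : Int) := by simp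
  rw [hlen, PySem.List.pyRange_zero_natCast, List.foldl_map]
  have hlen2 : S.length = (S ++ ["1"]).length - 1 := by simp
  rw [hlen2, rcore (S ++ ["1"]) 0 0, zero_add]

def prevH : Option String → String → Int
  | none, _ => 0
  | some m, x => (nlcp m x : Int) + 1

def lastCorr : Option String → List String → Int
  | _, [] => 0
  | p, [x] => if x.toList.head? = some '1' ∧ x ≠ "1" ∧ lcpOpt p x = 0 then 1 else 0
  | _, x :: y :: t => lastCorr (some x) (y :: t)

theorem len_ge_two (x : String) (h1 : x.toList.head? = some '1') (h2 : x ≠ "1") :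
    2 ≤ x.toList.length := by
  rcases hx : x.toList with _ | ⟨c, r⟩
  · rw [hx] at h1; simp at h1
  · rw [hx] at h1; simp at h1
    subst h1
    cases r with
    | nil => exact absurd (String.toList_inj.mp (by rw [hx]; rfl)) h2
    | cons d r' => simp

theorem pairGo_sum : ∀ (T : List String) (x : String) (P : List String),
    (P ++ x :: T).Pairwise (· < ·) → (x :: T).getLast? ≠ some "1" →
    pairGo (prevH P.getLast? x) (x :: T ++ ["1"]) =
      ((x :: T).map (gval (P ++ x :: T))).sum + lastCorr P.getLast? (x :: T) := by
  intro T
  induction T with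
  | nil =>
    intro x P hpair hlast
    have hx1 : x ≠ "1" := by simpa using hlast
    have hxl : x.toList ≠ ("1" : String).toList := fun h => hx1 (String.toList_inj.mp h)
    have haw : aWhile x.toList ("1" : String).toList 1 =
        (if x.toList.head? = some '1' then 1 else 0) + 1 := by
      rw [show ("1" : String).toList = ['1'] from rfl] at hxl ⊢
      rw [aWhile_one _ _ hxl, lcpB_one]
    have hg := gval_split P [] x hpair
    simp only [List.head?_nil, lcpOpt] at hg
    simp only [List.map_cons, List.map_nil, List.sum_cons, List.sum_nil,
      add_zero, lastCorr]
    show min (max ((aWhile x.toList ("1" : String).toList 1 : Nat) : Int) (prevH P.getLast? x))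
        (PySem.Str.len x) + pairGo _ (["1"]) = _
    rw [haw, hg]
    have hlen : PySem.Str.len x = (x.toList.length : Int) := PySem.Str.len_eq x
    by_cases hc1 : x.toList.head? = some '1'
    · have hl2 : 2 ≤ x.toList.length := len_ge_two x hc1 hx1
      rcases hp : P.getLast? with _ | m
      · simp only [prevH, lcpOpt, pairGo, if_pos hc1, hlen]
        rw [if_pos ⟨hc1, hx1, trivial⟩]
        omega
      · simp only [prevH, lcpOpt, pairGo, if_pos hc1, hlen]
        by_cases hc0 : nlcp m x = 0
        · rw [if_pos ⟨hc1, hx1, hc0⟩, hc0]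
          omega
        · rw [if_neg (by tauto)]
          omega
    · rcases hp : P.getLast? with _ | m <;>
      · simp only [prevH, lcpOpt, pairGo, if_neg hc1, hlen]
        rw [if_neg (by tauto)]
        omega
  | cons y T' ih =>
    intro x P hpair hlast
    have hL : (P ++ [x]) ++ y :: T' = P ++ x :: y :: T' := by simp
    have hxy : x < y := by
      have := (List.pairwise_append.mp hpair).2.1
      exact (List.pairwise_cons.mp this).1 y (by simp)
    have hxyne : x.toList ≠ y.toList :=
      fun h => absurd (String.toList_inj.mp h) (ne_of_lt hxy)
    have hlast' : (y :: T').getLast? ≠ some "1" := by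
      rwa [List.getLast?_cons_cons] at hlast
    have hpair' : ((P ++ [x]) ++ y :: T').Pairwise (· < ·) := by rw [hL]; exact hpair
    have hih := ih y (P ++ [x]) hpair' hlast'
    rw [List.getLast?_concat] at hih
    simp only [prevH] at hih
    show min (max ((aWhile x.toList y.toList 1 : Nat) : Int) (prevH P.getLast? x))
        (PySem.Str.len x) + pairGo _ (y :: T' ++ ["1"]) = _
    rw [aWhile_one _ _ hxyne]
    have hcast : ((lcpB x.toList y.toList + 1 : Nat) : Int) = ((nlcp x y : Nat) : Int) + 1 := by
      unfold nlcp; push_cast; ring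
    rw [hcast, hih, hL]
    simp only [List.map_cons, List.sum_cons, lastCorr]
    have hg := gval_split P (y :: T') x hpair
    simp only [List.head?_cons, lcpOpt] at hg
    rw [nlcp_comm y x] at hg
    rw [hg]
    rcases hp : P.getLast? with _ | m <;> simp only [prevH] <;> omega

theorem corr_char : ∀ (T : List String) (x : String) (P : List String),
    (P ++ x :: T).Pairwise (· < ·) →
    lastCorr P.getLast? (x :: T) =
      if ((x :: T).getLastD "").toList.head? = some '1' ∧ (x :: T).getLastD "" ≠ "1" ∧
          (∀ b ∈ P ++ x :: T, b ≠ (x :: T).getLastD "" → b.toList.head? ≠ some '1')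
      then 1 else 0 := by
  intro T
  induction T with
  | nil =>
    intro x P hpair
    rcases List.pairwise_append.mp hpair with ⟨hP, _, hcross⟩
    have hxl : ∀ p ∈ P, p < x := fun p hp => hcross p hp x (by simp)
    simp only [List.getLastD_cons, List.getLastD_nil, lastCorr]
    apply if_congr _ rfl rfl
    constructor
    · rintro ⟨h1, h2, h0⟩
      refine ⟨h1, h2, ?_⟩
      intro b hb hbne hbh
      rcases List.mem_append.mp hb with hbP | hbx
      · rcases hp : P.getLast? with _ | m
        · rw [List.getLast?_eq_none_iff.mp hp] at hbP; simp at hbP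
        · rw [hp] at h0
          simp only [lcpOpt] at h0
          have hmP : m ∈ P := List.mem_of_getLast? hp
          have hble : b ≤ m := rel_last P m hP hp b hbP
          obtain ⟨cm, hcm⟩ := str_head_ex b m hble '1' hbh
          have hle1 : '1' ≤ cm := str_head_le b m hble '1' cm hbh hcm
          have hle2 : cm ≤ '1' := str_head_le m x (le_of_lt (hxl m hmP)) cm '1' hcm h1
          have : cm = '1' := le_antisymm hle2 hle1
          subst this
          have := lcp_head_pos m.toList x.toList '1' hcm h1
          simp only [nlcp] at h0
          omega
      · simp at hbx; exact hbne hbx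
    · rintro ⟨h1, h2, hall⟩
      refine ⟨h1, h2, ?_⟩
      rcases hp : P.getLast? with _ | m
      · rfl
      · have hmP : m ∈ P := List.mem_of_getLast? hp
        have hmne : m ≠ x := ne_of_lt (hxl m hmP)
        have hmh : m.toList.head? ≠ some '1' :=
          hall m (List.mem_append_left _ hmP) hmne
        rcases hm : m.toList with _ | ⟨c, r⟩
        · simp only [lcpOpt, nlcp, hm]; rfl
        · have hc : c ≠ '1' := by
            intro h; subst h; rw [hm] at hmh; simp at hmh
          simp only [lcpOpt, nlcp, hm]
          exact lcp_zero_head _ _ c '1' rfl h1 hc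
  | cons y T' ih =>
    intro x P hpair
    have hL : (P ++ [x]) ++ y :: T' = P ++ x :: y :: T' := by simp
    have hpair' : ((P ++ [x]) ++ y :: T').Pairwise (· < ·) := by rw [hL]; exact hpair
    have hih := ih y (P ++ [x]) hpair'
    rw [List.getLast?_concat, hL] at hih
    simp only [lastCorr]
    rw [hih]
    simp only [List.getLastD_cons]

theorem enum_filter (l : List String) : ∀ (s : Int) (k : Nat), k < l.length →
    ((PySem.List.enumerate l s).filter (fun q => decide (q.1 ≠ s + (k : Int)))).map (·.2) =
      l.eraseIdx k := by
  induction l with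
  | nil => intro s k hk; simp at hk
  | cons x t ih =>
    intro s k hk
    rw [PySem.List.enumerate_cons]
    cases k with
    | zero =>
      rw [List.filter_cons]
      have : (decide ((s, x).1 ≠ s + ((0 : Nat) : Int))) = false := by simp
      rw [this]
      simp only [Bool.false_eq_true, if_false]
      have hall : (PySem.List.enumerate t (s + 1)).filter
          (fun q => decide (q.1 ≠ s + ((0 : Nat) : Int))) = PySem.List.enumerate t (s + 1) := by
        apply List.filter_eq_self.mpr
        intro q hq
        rcases (PySem.List.mem_enumerate_iff t (s + 1) q).mp hq with ⟨j, hj, rfl⟩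
        simp; omega
      rw [hall, PySem.List.map_snd_enumerate]
      rfl
    | succ k =>
      rw [List.filter_cons]
      have : (decide ((s, x).1 ≠ s + ((k + 1 : Nat) : Int))) = true := by simp; omega
      rw [this]
      simp only [if_true, List.map_cons]
      have hshift : (fun (q : Int × String) => decide (q.1 ≠ s + ((k + 1 : Nat) : Int))) =
          (fun (q : Int × String) => decide (q.1 ≠ (s + 1) + (k : Int))) := by
        funext q; congr 1; rw [show s + ((k + 1 : Nat) : Int) = (s + 1) + (k : Int) by push_cast; ring]
      rw [hshift, ih (s + 1) k (by simpa using hk)]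
      rfl

theorem inner_eq (words : List String) (hnd : words.Nodup) (k : Nat) (hk : k < words.length) :
    ((PySem.List.enumerate words).foldl (fun best q =>
        if q.1 ≠ ((0 : Int) + (k : Int)) then
          if lcpB (words[k]).toList q.2.toList > best then lcpB (words[k]).toList q.2.toList
          else best
        else best) 0) =
      maxL ((words.erase words[k]).map (nlcp words[k])) := by
  have hbody : ∀ (best : Nat), ∀ q ∈ PySem.List.enumerate words,
      (if q.1 ≠ ((0 : Int) + (k : Int)) then
        if lcpB (words[k]).toList q.2.toList > best then lcpB (words[k]).toList q.2.toList
        else best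
      else best) =
      (if q.1 ≠ ((0 : Int) + (k : Int)) then max best (nlcp words[k] q.2) else best) := by
    intro best q _
    unfold nlcp
    split_ifs <;> omega
  rw [PySem.List.foldl_congr_mem _ _ _ _ hbody]
  rw [PySem.List.foldl_ite_eq_foldl_filter (p := fun q : Int × String => q.1 ≠ ((0 : Int) + (k : Int)))
    (f := fun best (q : Int × String) => max best (nlcp words[k] q.2))]
  rw [show (fun (best : Nat) (q : Int × String) => max best (nlcp words[k] q.2)) =
      (fun (best : Nat) (q : Int × String) => max best ((fun q : Int × String => nlcp words[k] q.2) q)) from rfl]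
  rw [← List.foldl_map (f := fun q : Int × String => nlcp words[k] q.2) (g := max)]
  have hmm : ((PySem.List.enumerate words).filter
        (fun q : Int × String => decide (q.1 ≠ ((0 : Int) + (k : Int))))).map
        (fun q : Int × String => nlcp words[k] q.2) =
      (words.eraseIdx k).map (nlcp words[k]) := by
    rw [← enum_filter words 0 k hk, List.map_map]
    rfl
  rw [hmm, List.Nodup.erase_getElem hnd]
  rfl

theorem alt_eq (words : List String) (hnd : words.Nodup) :
    solution_alt words = (words.map (gval words)).sum := by
  unfold solution_alt
  rw [PySem.List.foldl_add]
  rw [zero_add]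
  have hcong : ∀ p ∈ PySem.List.enumerate words,
      min ((((PySem.List.enumerate words).foldl (fun best q =>
            if q.1 ≠ p.1 then
              if lcpB p.2.toList q.2.toList > best then lcpB p.2.toList q.2.toList else best
            else best) 0 : Nat) : Int) + 1) (PySem.Str.len p.2) = gval words p.2 := by
    intro p hp
    rcases (PySem.List.mem_enumerate_iff words 0 p).mp hp with ⟨j, hj, rfl⟩
    rw [inner_eq words hnd j hj]
    rfl
  rw [List.map_congr_left hcong]
  rw [show (fun p : Int × String => gval words p.2) =
      (gval words) ∘ (fun q : Int × String => q.2) from rfl]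
  rw [← List.map_map, PySem.List.map_snd_enumerate]

theorem sortedW_chain (words : List String) (hnd : words.Nodup) :
    (sortedW words).Pairwise (· < ·) := by
  have hle : (sortedW words).Pairwise (· ≤ ·) := by
    have := PySem.List.sorted_pairwise (xs := words) (key := fun s : String => s)
    simpa [sortedW] using this
  have hnd' : (sortedW words).Nodup :=
    ((PySem.List.sorted_perm words (fun s => s) false).nodup_iff).mpr hnd
  exact (hle.and hnd').imp (fun h => lt_of_le_of_ne h.1 h.2)

theorem gsum_sorted (words : List String) (_hnd : words.Nodup) :
    (words.map (gval words)).sum = ((sortedW words).map (gval (sortedW words))).sum := by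
  have hperm : (sortedW words).Perm words := PySem.List.sorted_perm words (fun s => s) false
  have hg : ∀ x ∈ words, gval words x = gval (sortedW words) x := by
    intro x hx
    unfold gval
    have he : (words.erase x).Perm ((sortedW words).erase x) := (hperm.erase x).symm
    unfold maxL
    rw [List.Perm.foldl_op_eq (he.map (nlcp x))]
  rw [List.map_congr_left hg]
  exact List.Perm.sum_eq ((hperm.map (gval (sortedW words))).symm)

theorem max_of_last (words : List String) (hnd : words.Nodup) (a : String)
    (h : (sortedW words).getLast? = some a) : a ∈ words ∧ ∀ b ∈ words, b ≤ a := by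
  have hchain := sortedW_chain words hnd
  have hmemS : ∀ b : String, b ∈ sortedW words ↔ b ∈ words := fun b =>
    PySem.List.mem_sorted words (fun s => s) false b
  refine ⟨(hmemS a).mp (List.mem_of_getLast? h), fun b hb => ?_⟩
  exact rel_last (sortedW words) a hchain h b ((hmemS b).mpr hb)

theorem last_of_max (words : List String) (hnd : words.Nodup) (a : String) (ha : a ∈ words)
    (hmax : ∀ b ∈ words, b ≤ a) : (sortedW words).getLast? = some a := by
  have hchain := sortedW_chain words hnd
  have hmemS : ∀ b : String, b ∈ sortedW words ↔ b ∈ words := fun b =>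
    PySem.List.mem_sorted words (fun s => s) false b
  rcases hS : (sortedW words).getLast? with _ | m
  · rw [List.getLast?_eq_none_iff] at hS
    unfold sortedW at hS
    rw [PySem.List.sorted_eq_nil_iff] at hS
    rw [hS] at ha; simp at ha
  · have hm : m ∈ words := (hmemS m).mp (List.mem_of_getLast? hS)
    have h1 : m ≤ a := hmax m hm
    have h2 : a ≤ m := rel_last (sortedW words) m hchain hS a ((hmemS a).mpr ha)
    rw [le_antisymm h1 h2]

theorem pre_getLast (words : List String) (hPre : Pre_solution words) :
    (sortedW words).getLast? ≠ some "1" := by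
  intro h
  obtain ⟨hmem, hmax⟩ := max_of_last words hPre.1 "1" h
  exact hPre.2 ⟨hmem, fun b hb => String.le_iff_toList_le.mp (hmax b hb)⟩

theorem solution_eq (words : List String) (hPre : Pre_solution words) :
    solution words =
      ((sortedW words).map (gval (sortedW words))).sum + lastCorr none (sortedW words) := by
  rw [solution_eq_pairGo]
  have hp2 : (sortedW words).getLast? ≠ some "1" := pre_getLast words hPre
  have hchain := sortedW_chain words hPre.1
  rcases hS : sortedW words with _ | ⟨x, T⟩
  · simp [pairGo, lastCorr]
  · rw [hS] at hchain hp2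
    have := pairGo_sum T x [] (by simpa using hchain) hp2
    simp only [List.nil_append, List.getLast?_nil, prevH] at this
    rw [show (x :: T) ++ ["1"] = x :: T ++ ["1"] from rfl, this]

theorem corr_eq_D (words : List String) (hPre : Pre_solution words) :
    lastCorr none (sortedW words) = if D_solution words then 1 else 0 := by
  have hnd := hPre.1
  have hchain := sortedW_chain words hnd
  have hmemS : ∀ b : String, b ∈ sortedW words ↔ b ∈ words := fun b =>
    PySem.List.mem_sorted words (fun s => s) false b
  rcases hS : sortedW words with _ | ⟨x, T⟩
  · rw [show lastCorr none ([] : List String) = 0 from rfl]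
    rw [if_neg]
    rintro ⟨a, ha, -⟩
    unfold sortedW at hS
    rw [PySem.List.sorted_eq_nil_iff] at hS
    rw [hS] at ha; simp at ha
  · rw [hS] at hchain
    have hcc := corr_char T x [] (by simpa using hchain)
    simp only [List.getLast?_nil, List.nil_append] at hcc
    rw [hcc]
    have hgl : (x :: T).getLast? = some ((x :: T).getLastD "") := by
      rw [List.getLastD_eq_getLast?]
      cases hq : (x :: T).getLast? with
      | none => rw [List.getLast?_eq_none_iff] at hq; simp at hq
      | some g => rfl
    have hglS : (sortedW words).getLast? = some ((x :: T).getLastD "") := by rw [hS]; exact hgl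
    have hmemxT : ∀ b : String, b ∈ x :: T ↔ b ∈ words := by
      intro b; rw [← hS]; exact hmemS b
    apply if_congr _ rfl rfl
    constructor
    · rintro ⟨h1, h2, h3⟩
      obtain ⟨hmem, hmax⟩ := max_of_last words hnd _ hglS
      refine ⟨(x :: T).getLastD "", hmem,
        fun b hb => String.le_iff_toList_le.mp (hmax b hb), h1, h2, ?_⟩
      intro b hb hne
      exact h3 b (by simpa using (hmemxT b).mpr hb) hne
    · rintro ⟨a, ha, hmax, h1, h2, h3⟩
      have : (sortedW words).getLast? = some a :=
        last_of_max words hnd a ha (fun b hb => String.le_iff_toList_le.mpr (hmax b hb))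
      rw [hglS] at this
      injection this with heq
      subst heq
      refine ⟨h1, h2, ?_⟩
      intro b hb hne
      exact h3 b ((hmemxT b).mp (by simpa using hb)) hne

theorem AB_split (words : List String) (hPre : Pre_solution words) :
    solution words = solution_alt words + (if D_solution words then 1 else 0) := by
  rw [solution_eq words hPre, alt_eq words hPre.1, gsum_sorted words hPre.1,
    corr_eq_D words hPre]

-- ===== VERDICT (by name: the statement is the Claim_ definition above) =====
theorem solution_spec : Claim_unchanged_solution := by
  intro words _ hPre hnD
  rw [AB_split words hPre, if_neg hnD, add_zero]

theorem solution_changed : Claim_changed_solution := by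
  unfold Claim_changed_solution; decide

theorem solution_tight : Claim_exact_solution := by
  intro words _ hPre hD
  rw [AB_split words hPre, if_pos hD]
  omega
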